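-- pv_equiv track=rewrite | github.com/MelodieCsn/TERReddit | scrapping.py | existNameSocialNetwork
-- ===== SOURCE A (Python) =====
-- def existNameSocialNetwork(title):
--
--     title = str(title)
--     indice = title.find("Insta")
--     if indice < 0:
--         indice = title.find("Instagram")
--         if indice < 0:
--             indice = title.find("instagram")
--             if indice < 0:
--                 indice = title.find("instaGram")
--                 if indice < 0:
--                     indice = title.find("insta")
--                     if indice < 0:
--                         indice = title.find("Facebook")
--                         if indice < 0:
--                             indice = title.find("facebook")
--                             if indice < 0:
--                                 indice = title.find("FaceBook")
--                                 if indice < 0: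
--                                     indice = title.find("Fb")
--                                     if indice < 0:
--                                         indice = title.find("fb")
--                                         if indice < 0:
--                                             indice = title.find("FB")
--
--
--     if indice >= 0:
--         indice = indice + 1
--         a = title[:indice-1]
--         while indice < len(title) and title[indice] != " ":
--             indice = indice + 1
--         title = a+title[indice:]
--         return existNameSocialNetwork(title)
--     return title
-- ===== SOURCE B (Python) =====
-- # Iterative re-implementation: one keyword list scanned in A's priority order
-- # (minus "Instagram", which A only consults when "Insta" is absent and which can
-- # then never match), a while-True loop instead of tail recursion, and the
-- # word-end located with str.find(" ", index + 1) instead of a char-by-char walk.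
-- KEYWORDS = ("Insta", "instagram", "instaGram", "insta",
--             "Facebook", "facebook", "FaceBook", "Fb", "fb", "FB")
--
--
-- def existNameSocialNetwork(title):
--     title = str(title)
--     while True:
--         index = -1
--         for kw in KEYWORDS:
--             index = title.find(kw)
--             if index >= 0:
--                 break
--         if index < 0:
--             return title
--         space = title.find(" ", index + 1)
--         end = space if space >= 0 else len(title)
--         title = title[:index] + title[end:]
-- ===== Notes on version B (the rewrite author's own statement) =====
-- stated objective: simpler
-- what changed: Replaces A's eleven-level nested find-cascade and tail recursion by a while-True loop scanning one keyword list (dropping the Instagram entry, which is unreachable once its prefix keyword is absent) and locates the end of the matched token with a single str.find call for the separating space instead of a character-by-character index walk.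
import Mathlib
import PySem

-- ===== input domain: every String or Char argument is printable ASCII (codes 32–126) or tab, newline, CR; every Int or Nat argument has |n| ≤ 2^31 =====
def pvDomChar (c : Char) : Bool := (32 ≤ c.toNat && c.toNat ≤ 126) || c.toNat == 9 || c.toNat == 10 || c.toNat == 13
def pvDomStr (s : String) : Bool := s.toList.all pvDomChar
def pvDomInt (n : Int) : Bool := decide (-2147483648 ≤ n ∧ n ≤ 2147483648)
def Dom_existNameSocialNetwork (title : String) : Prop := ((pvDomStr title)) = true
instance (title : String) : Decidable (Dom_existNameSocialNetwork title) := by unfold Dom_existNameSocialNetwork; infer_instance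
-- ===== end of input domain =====

-- B replaces A's eleven-branch find cascade by a loop over a keyword list (dropping
-- the unreachable "Instagram" entry), A's tail recursion by iteration, and A's
-- char-by-char word-end walk by title.find(" ", index + 1); objective: simpler.

-- ===== PORT A =====

-- `while indice < len(title) and title[indice] != " ": indice = indice + 1`
-- (at this point in A, indice ≥ 1, so it is carried as a Nat).
def pvSkipA (s : List Char) (indice : Nat) : Nat :=
  if h : indice < s.length then
    if s[indice] ≠ ' ' then pvSkipA s (indice + 1) else indice
  else indice
termination_by s.length - indice

-- A's nested `title.find(...)` cascade computing `indice` (each branch reassigns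
-- `indice`, so the nested ifs carry the corresponding find term).
def pvCascadeA (title : List Char) : Int :=
  if PySem.Chars.find title "Insta".toList < 0 then
    if PySem.Chars.find title "Instagram".toList < 0 then
      if PySem.Chars.find title "instagram".toList < 0 then
        if PySem.Chars.find title "instaGram".toList < 0 then
          if PySem.Chars.find title "insta".toList < 0 then
            if PySem.Chars.find title "Facebook".toList < 0 then
              if PySem.Chars.find title "facebook".toList < 0 then
                if PySem.Chars.find title "FaceBook".toList < 0 then
                  if PySem.Chars.find title "Fb".toList < 0 then
                    if PySem.Chars.find title "fb".toList < 0 then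
                      PySem.Chars.find title "FB".toList
                    else PySem.Chars.find title "fb".toList
                  else PySem.Chars.find title "Fb".toList
                else PySem.Chars.find title "FaceBook".toList
              else PySem.Chars.find title "facebook".toList
            else PySem.Chars.find title "Facebook".toList
          else PySem.Chars.find title "insta".toList
        else PySem.Chars.find title "instaGram".toList
      else PySem.Chars.find title "instagram".toList
    else PySem.Chars.find title "Instagram".toList
  else PySem.Chars.find title "Insta".toList

-- `if indice >= 0:` — indice = indice + 1; a = title[:indice-1]; the while loop
-- advances indice; title = a + title[indice:]; return existNameSocialNetwork(title).
-- fuel is a totality guard only: every recursive step deletes at least one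
-- character, so the wrapper's fuel length+1 is never exhausted.
def pvGoA (fuel : Nat) (title : List Char) : List Char :=
  match fuel with
  | 0 => title
  | n + 1 =>
    if 0 ≤ pvCascadeA title then
      pvGoA n (PySem.List.slice title none (some (pvCascadeA title + 1 - 1)) ++
               PySem.List.slice title
                 (some ((pvSkipA title (pvCascadeA title + 1).toNat : Nat) : Int)) none)
    else title

-- str(title) is the identity on a str argument
def existNameSocialNetwork (title : String) : String :=
  String.ofList (pvGoA (title.toList.length + 1) title.toList)

-- ===== PORT B =====

-- B's KEYWORDS tuple, in the same priority order
def pvKeywordsB : List (List Char) :=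
  ["Insta".toList, "instagram".toList, "instaGram".toList, "insta".toList,
   "Facebook".toList, "facebook".toList, "FaceBook".toList,
   "Fb".toList, "fb".toList, "FB".toList]

-- `for kw in KEYWORDS: index = title.find(kw); if index >= 0: break`
-- (when the loop falls through, index is the last find's value, which is -1)
def pvScanB (title : List Char) : List (List Char) → Int
  | [] => -1
  | kw :: rest =>
    if 0 ≤ PySem.Chars.find title kw then PySem.Chars.find title kw
    else pvScanB title rest

-- the `while True:` loop body: `space = title.find(" ", index + 1);`
-- `end = space if space >= 0 else len(title); title = title[:index] + title[end:]`.
-- fuel is a totality guard only, as in pvGoA.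
def pvGoB (fuel : Nat) (title : List Char) : List Char :=
  match fuel with
  | 0 => title
  | n + 1 =>
    if 0 ≤ pvScanB title pvKeywordsB then
      pvGoB n (PySem.List.slice title none (some (pvScanB title pvKeywordsB)) ++
               PySem.List.slice title
                 (some (if 0 ≤ PySem.Chars.findFrom title [' '] (pvScanB title pvKeywordsB + 1) none
                        then PySem.Chars.findFrom title [' '] (pvScanB title pvKeywordsB + 1) none
                        else (title.length : Int))) none)
    else title

def existNameSocialNetwork_alt (title : String) : String :=
  String.ofList (pvGoB (title.toList.length + 1) title.toList)

-- ===== PRECONDITION & SPEC =====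
def Spec_existNameSocialNetwork (title : String) (out : String) : Prop := out = existNameSocialNetwork_alt title
instance (title : String) (out : String) : Decidable (Spec_existNameSocialNetwork title out) := by unfold Spec_existNameSocialNetwork; infer_instance

-- ===== CLAIM (what is proved, stated in full; the proofs are below) =====
def Claim_equal_existNameSocialNetwork : Prop := ∀ (title : String), Dom_existNameSocialNetwork title → Spec_existNameSocialNetwork title (existNameSocialNetwork title)

-- ===== LEMMAS AND PROOFS =====

-- a found index of a nonempty pattern is a valid position
theorem pv_find_toNat_lt (s sub : List Char) (hne : sub ≠ [])
    (h : 0 ≤ PySem.Chars.find s sub) : (PySem.Chars.find s sub).toNat < s.length := by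
  have hpre := (PySem.Chars.find_spec h).1
  have h1 := hpre.length_le
  have h2 : 0 < sub.length := List.length_pos_iff.mpr hne
  simp only [List.length_drop] at h1
  omega

theorem pvCascadeA_toNat_lt (t : List Char) (h : 0 ≤ pvCascadeA t) :
    (pvCascadeA t).toNat < t.length := by
  unfold pvCascadeA at *
  split_ifs at h ⊢ <;> exact pv_find_toNat_lt _ _ (by decide) h

theorem pvSkipA_ge (s : List Char) (k : Nat) : k ≤ pvSkipA s k := by
  unfold pvSkipA
  split_ifs with h1 h2
  · have := pvSkipA_ge s (k + 1); omega
  · exact le_refl k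
  · exact le_refl k
termination_by s.length - k

-- when "Insta" is absent, "Instagram" (which contains it) is absent too
theorem pv_instagram_absent (t : List Char)
    (h : PySem.Chars.find t "Insta".toList < 0) :
    PySem.Chars.find t "Instagram".toList = -1 := by
  have h1 := PySem.Chars.neg_one_le_find t "Insta".toList
  have h2 : PySem.Chars.find t "Insta".toList = -1 := by omega
  rw [PySem.Chars.find_eq_neg_one_iff] at h2 ⊢
  intro hIG
  exact h2 (List.IsInfix.trans (by decide) hIG)

theorem pv_ifFlip (f X Y : Int) (h : f < 0 → X = Y) :
    (if f < 0 then X else f) = (if 0 ≤ f then f else Y) := by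
  by_cases hf : f < 0
  · rw [if_pos hf, if_neg (by omega), h hf]
  · rw [if_neg hf, if_pos (by omega)]

-- A's cascade and B's keyword-list scan agree
theorem pvCascade_eq_scan (t : List Char) : pvCascadeA t = pvScanB t pvKeywordsB := by
  unfold pvCascadeA pvKeywordsB
  simp only [pvScanB]
  refine pv_ifFlip _ _ _ (fun h1 => ?_)
  rw [pv_instagram_absent t h1, if_pos (by omega)]
  refine pv_ifFlip _ _ _ (fun _ => ?_)
  refine pv_ifFlip _ _ _ (fun _ => ?_)
  refine pv_ifFlip _ _ _ (fun _ => ?_)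
  refine pv_ifFlip _ _ _ (fun _ => ?_)
  refine pv_ifFlip _ _ _ (fun _ => ?_)
  refine pv_ifFlip _ _ _ (fun _ => ?_)
  refine pv_ifFlip _ _ _ (fun _ => ?_)
  refine pv_ifFlip _ _ _ (fun _ => ?_)
  have := PySem.Chars.neg_one_le_find t "FB".toList
  split_ifs <;> omega

theorem pv_prefix_single_iff (c : Char) (l : List Char) : [c] <+: l ↔ l.head? = some c := by
  cases l <;> simp [List.prefix_cons_iff, eq_comm]

theorem pv_prefix_single_drop (c : Char) (s : List Char) (j : Nat) :
    [c] <+: s.drop j ↔ s[j]? = some c := by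
  rw [pv_prefix_single_iff, List.head?_drop]

theorem pvSkipA_le_len (s : List Char) (k : Nat) (hk : k ≤ s.length) :
    pvSkipA s k ≤ s.length := by
  unfold pvSkipA
  split_ifs with h1 h2
  · exact pvSkipA_le_len s (k + 1) (by omega)
  · exact hk
  · exact hk
termination_by s.length - k

theorem pvSkipA_stop (s : List Char) (k : Nat) (h : pvSkipA s k < s.length) :
    s[pvSkipA s k]? = some ' ' := by
  unfold pvSkipA at *
  split_ifs at h ⊢ with h1 h2
  · exact pvSkipA_stop s (k + 1) h
  · rw [ne_eq, not_not] at h2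
    exact (List.getElem?_eq_some_iff).mpr ⟨h1, h2⟩
  · omega
termination_by s.length - k

theorem pvSkipA_min (s : List Char) (k : Nat) :
    ∀ i, k ≤ i → i < pvSkipA s k → s[i]? ≠ some ' ' := by
  intro i hki hilt
  unfold pvSkipA at hilt
  split_ifs at hilt with h1 h2
  · rcases Nat.eq_or_lt_of_le hki with hik | hik
    · subst hik
      intro hc
      rw [List.getElem?_eq_some_iff] at hc
      exact h2 hc.2
    · exact pvSkipA_min s (k + 1) i hik hilt
  · exact absurd hilt (by omega)
  · exact absurd hilt (by omega)
termination_by s.length - k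

-- A's char-by-char walk equals B's `space = title.find(" ", k); end = space if space >= 0 else len`
theorem pvSkip_eq_space (s : List Char) (k : Nat) (hk : k ≤ s.length) :
    (pvSkipA s k : Int) =
      (if 0 ≤ PySem.Chars.findFrom s [' '] (k : Int) none then
        PySem.Chars.findFrom s [' '] (k : Int) none
      else (s.length : Int)) := by
  by_cases hneg : PySem.Chars.findFrom s [' '] (k : Int) none = -1
  · rw [if_neg (by omega)]
    -- no space at or after k : the walk runs to the end of the string
    have hnosp : ¬ ([' '] : List Char) <:+: s.drop k :=
      (PySem.Chars.findFrom_natCast_eq_neg_one_iff s [' '] k hk).1 hneg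
    have hle := pvSkipA_le_len s k hk
    have hge := pvSkipA_ge s k
    rcases Nat.lt_or_ge (pvSkipA s k) s.length with hlt | hge2
    · exfalso
      have hsp := pvSkipA_stop s k hlt
      rw [← pv_prefix_single_drop ' ' s (pvSkipA s k)] at hsp
      have e : List.drop (pvSkipA s k - k) (List.drop k s) = List.drop (pvSkipA s k) s := by
        rw [List.drop_drop]; congr 1; omega
      have hsp2 : ([' '] : List Char) <+: List.drop (pvSkipA s k - k) (List.drop k s) := by
        rw [e]; exact hsp
      exact hnosp (hsp2.isInfix.trans (List.drop_suffix _ _).isInfix)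
    · omega
  · have hspec := PySem.Chars.findFrom_natCast_spec s [' '] k hk hneg
    have h0 : 0 ≤ PySem.Chars.findFrom s [' '] (k : Int) none := by have := hspec.1; omega
    rw [if_pos h0]
    have hsp : s[(PySem.Chars.findFrom s [' '] (k : Int) none).toNat]? = some ' ' :=
      (pv_prefix_single_drop ' ' s _).1 hspec.2.1
    -- antisymmetry between the walk's stopping point and the first space
    have hle1 : pvSkipA s k ≤ (PySem.Chars.findFrom s [' '] (k : Int) none).toNat := by
      by_contra hgt
      exact pvSkipA_min s k _ (by have := hspec.1; omega) (by omega) hsp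
    have hle2 : (PySem.Chars.findFrom s [' '] (k : Int) none).toNat ≤ pvSkipA s k := by
      by_contra hgt
      have hFlt : (PySem.Chars.findFrom s [' '] (k : Int) none).toNat < s.length := by
        rw [List.getElem?_eq_some_iff] at hsp; exact hsp.1
      have hstop := pvSkipA_stop s k (by omega)
      rw [← pv_prefix_single_drop ' ' s (pvSkipA s k)] at hstop
      exact hspec.2.2 (pvSkipA s k) (pvSkipA_ge s k) (by omega) hstop
    omega

-- the two loops agree step for step, whatever the fuel
theorem pvGo_eq (fuel : Nat) : ∀ t : List Char, pvGoA fuel t = pvGoB fuel t := by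
  induction fuel with
  | zero => intro t; rfl
  | succ n ih =>
    intro t
    rw [pvGoA, pvGoB]
    rw [← pvCascade_eq_scan t]
    by_cases h : 0 ≤ pvCascadeA t
    · rw [if_pos h, if_pos h]
      have hi := pvCascadeA_toNat_lt t h
      have hk : (pvCascadeA t).toNat + 1 ≤ t.length := by omega
      have hc : (((pvCascadeA t).toNat + 1 : Nat) : Int) = pvCascadeA t + 1 := by omega
      have hsp := pvSkip_eq_space t ((pvCascadeA t).toNat + 1) hk
      rw [hc] at hsp
      rw [show (pvCascadeA t + 1 - 1 : Int) = pvCascadeA t by ring,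
          show (pvCascadeA t + 1).toNat = (pvCascadeA t).toNat + 1 by omega,
          hsp]
      exact ih _
    · rw [if_neg h, if_neg h]

-- ===== VERDICT (by name: the statement is the Claim_ definition above) =====
theorem existNameSocialNetwork_spec : Claim_equal_existNameSocialNetwork := by
  intro title _
  unfold Spec_existNameSocialNetwork existNameSocialNetwork existNameSocialNetwork_alt
  rw [pvGo_eq]
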